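-- pv_equiv track=rewrite | github.com/JacopoSfolgor1/Jacopo-Sfolgori-Python | Recupero/FunzioniForWhileIfElse/1-3.py | multiply_recur
-- ===== SOURCE A (Python) =====
-- def multiply_recur(lst: list, threshold: int):
--     if not lst:
--         return None
--
--     x = lst[0]
--     y = lst[1:]
--
--     result = multiply_recur(y, threshold)
--
--     if x < threshold:
--         if result is None:
--             return x
--         return x * result
--     else:
--         return result
-- ===== SOURCE B (Python) =====
-- def multiply_recur(lst: list, threshold: int):
--     result = None
--     for x in lst:
--         if x < threshold:
--             result = x if result is None else result * x
--     return result
-- ===== Notes on version B (the rewrite author's own statement) =====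
-- stated objective: faster
-- what changed: Replaces the recursion with per-call list slicing by a single iterative left-to-right pass accumulating the product in an Optional accumulator.
import Mathlib
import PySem

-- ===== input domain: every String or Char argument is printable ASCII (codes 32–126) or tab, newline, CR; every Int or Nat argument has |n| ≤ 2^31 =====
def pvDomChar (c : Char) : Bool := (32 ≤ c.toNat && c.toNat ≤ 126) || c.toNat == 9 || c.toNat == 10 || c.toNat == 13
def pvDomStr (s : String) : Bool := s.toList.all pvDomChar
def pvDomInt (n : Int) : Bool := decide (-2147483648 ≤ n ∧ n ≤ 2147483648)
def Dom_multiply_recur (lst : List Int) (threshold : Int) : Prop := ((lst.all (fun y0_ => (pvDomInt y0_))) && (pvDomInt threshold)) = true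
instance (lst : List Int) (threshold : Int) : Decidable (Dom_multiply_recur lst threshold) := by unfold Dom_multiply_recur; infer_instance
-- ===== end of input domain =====

-- B replaces A's slicing recursion by a single iterative fold accumulating the product (faster: O(n) vs O(n^2) from per-call slicing).


-- ===== PORT A =====
-- literal transliteration of A: recursion on head/tail, combining after the recursive call
def multiply_recur (lst : List Int) (threshold : Int) : Option Int :=
  match lst with
  | [] => none
  | x :: y =>
    let result := multiply_recur y threshold
    if x < threshold then
      match result with
      | none => some x
      | some r => some (x * r)
    else result

-- ===== PORT B =====
-- literal transliteration of B: one pass, Optional accumulator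
def multiply_recur_alt (lst : List Int) (threshold : Int) : Option Int :=
  lst.foldl
    (fun result x =>
      if x < threshold then
        some (match result with
              | none => x
              | some r => r * x)
      else result)
    none

-- ===== PRECONDITION & SPEC =====
def Spec_multiply_recur (lst : List Int) (threshold : Int) (out : Option Int) : Prop := out = multiply_recur_alt lst threshold
instance (lst : List Int) (threshold : Int) (out : Option Int) : Decidable (Spec_multiply_recur lst threshold out) := by unfold Spec_multiply_recur; infer_instance

-- ===== CLAIM (what is proved, stated in full; the proofs are below) =====
def Claim_equal_multiply_recur : Prop := ∀ (lst : List Int) (threshold : Int), Dom_multiply_recur lst threshold → Spec_multiply_recur lst threshold (multiply_recur lst threshold)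

-- ===== LEMMAS AND PROOFS =====

-- combine a partial product of already-seen elements with A's result for the rest
def pvComb (acc : Option Int) (rest : Option Int) : Option Int :=
  match acc, rest with
  | a, none => a
  | none, some p => some p
  | some a, some p => some (a * p)

theorem foldl_eq_comb (threshold : Int) (xs : List Int) :
    ∀ acc : Option Int,
      xs.foldl
        (fun result x =>
          if x < threshold then
            some (match result with
                  | none => x
                  | some r => r * x)
          else result)
        acc = pvComb acc (multiply_recur xs threshold) := by
  induction xs with
  | nil => intro acc; cases acc <;> simp [pvComb, multiply_recur]
  | cons x xs ih =>
    intro acc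
    simp only [List.foldl_cons, ih, multiply_recur]
    by_cases h : x < threshold
    · simp only [h, if_pos]
      cases acc <;> cases hr : multiply_recur xs threshold <;>
        simp [pvComb, hr] <;> ring
    · simp [h, pvComb]

theorem a_eq_b (lst : List Int) (threshold : Int) :
    multiply_recur lst threshold = multiply_recur_alt lst threshold := by
  have := foldl_eq_comb threshold lst (acc := none)
  simp only [multiply_recur_alt, this]
  cases multiply_recur lst threshold <;> rfl

-- ===== VERDICT (by name: the statement is the Claim_ definition above) =====
theorem multiply_recur_spec : Claim_equal_multiply_recur := by
  intro lst threshold _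
  unfold Spec_multiply_recur
  exact a_eq_b lst threshold
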